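-- pv_equiv track=rewrite | github.com/hassxa96/Programaci-n | EjerciciosFunciones/Ejercicio19.py | iguales
-- ===== SOURCE A (Python) =====
-- def iguales(a,b):
--     contador=0
--     for i,h in zip(a,b):
--         if i!=h:
--             contador+=1
--     if contador!=0:
--         contador="Las listas son distintas"
--     else:
--         contador="Las listas son iguales"
--     return contador
-- ===== SOURCE B (Python) =====
-- def iguales(a, b):
--     n = min(len(a), len(b))
--     return "Las listas son iguales" if a[:n] == b[:n] else "Las listas son distintas"
-- ===== Notes on version B (the rewrite author's own statement) =====
-- stated objective: simpler
-- what changed: Replaces the mismatch-counting loop over zip(a,b) with a single truncate-to-min-length prefix comparison (a[:n] == b[:n]) decided by built-in list equality.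
import Mathlib
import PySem

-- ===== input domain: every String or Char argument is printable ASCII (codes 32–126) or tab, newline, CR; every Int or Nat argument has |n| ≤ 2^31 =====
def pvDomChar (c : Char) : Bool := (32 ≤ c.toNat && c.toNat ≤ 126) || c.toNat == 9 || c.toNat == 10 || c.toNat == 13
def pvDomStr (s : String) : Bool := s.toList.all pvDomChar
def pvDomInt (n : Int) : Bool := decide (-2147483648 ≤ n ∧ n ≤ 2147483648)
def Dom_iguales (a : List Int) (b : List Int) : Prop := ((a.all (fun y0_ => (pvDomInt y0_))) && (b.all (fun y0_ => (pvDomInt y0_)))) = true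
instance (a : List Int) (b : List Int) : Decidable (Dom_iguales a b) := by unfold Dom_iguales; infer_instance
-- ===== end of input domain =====

-- B replaces the mismatch-counting loop over zip with a prefix-truncate-and-compare; objective: simpler.
-- ===== PORT A =====
def iguales (a : List Int) (b : List Int) : String :=
  let contador : Int := (a.zip b).foldl (fun c p => if p.1 ≠ p.2 then c + 1 else c) 0
  if contador ≠ 0 then "Las listas son distintas" else "Las listas son iguales"

-- ===== PORT B =====
def iguales_alt (a : List Int) (b : List Int) : String :=
  let n := min a.length b.length
  if a.take n == b.take n then "Las listas son iguales" else "Las listas son distintas"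

-- ===== PRECONDITION & SPEC =====
def Spec_iguales (a : List Int) (b : List Int) (out : String) : Prop := out = iguales_alt a b
instance (a : List Int) (b : List Int) (out : String) : Decidable (Spec_iguales a b out) := by unfold Spec_iguales; infer_instance

-- ===== CLAIM (what is proved, stated in full; the proofs are below) =====
def Claim_equal_iguales : Prop := ∀ (a : List Int) (b : List Int), Dom_iguales a b → Spec_iguales a b (iguales a b)

-- ===== LEMMAS AND PROOFS =====

-- ===== VERDICT (by name: the statement is the Claim_ definition above) =====
-- fold accumulator never decreases (stated in simp-normal form of A's step function)
theorem pv_fold_ge (l : List (Int × Int)) (c : Int) :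
    c ≤ l.foldl (fun c p => if p.1 = p.2 then c else c + 1) c := by
  induction l generalizing c with
  | nil => simp
  | cons h t ih =>
    simp only [List.foldl_cons]
    split
    · exact ih c
    · exact le_trans (by omega) (ih (c + 1))

theorem pv_fold_zero_iff (a b : List Int) :
    ((a.zip b).foldl (fun c p => if p.1 = p.2 then c else c + 1) (0 : Int) = 0) ↔
      a.take (min a.length b.length) = b.take (min a.length b.length) := by
  induction a generalizing b with
  | nil => simp
  | cons x xs ih =>
    cases b with
    | nil => simp
    | cons y ys =>
      simp only [List.zip_cons_cons, List.foldl_cons, List.length_cons,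
        Nat.succ_min_succ, List.take_succ_cons]
      by_cases hxy : x = y
      · subst hxy
        simpa using ih ys
      · rw [if_neg hxy]
        simp only [zero_add]
        have h1 := pv_fold_ge (xs.zip ys) (1 : Int)
        constructor
        · intro h; omega
        · intro h; exact absurd (List.cons.injEq .. ▸ h).1 hxy

theorem iguales_spec : Claim_equal_iguales := by
  intro a b _
  unfold Spec_iguales iguales iguales_alt
  by_cases h : a.take (min a.length b.length) = b.take (min a.length b.length)
  · have hz := (pv_fold_zero_iff a b).mpr h
    simp [h]
    exact hz
  · have hz : ¬ ((a.zip b).foldl (fun c p => if p.1 = p.2 then c else c + 1) (0 : Int) = 0) :=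
      fun hz0 => h ((pv_fold_zero_iff a b).mp hz0)
    simp [h]
    exact hz
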